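-- pv_equiv track=rewrite | github.com/wadaka0821/nlp100 | chapter2/ex12.py | extract_cols
-- ===== SOURCE A (Python) =====
-- def extract_cols(text:str, cols:list[int]) -> dict[int, list[str]]:
--     texts = [line.split('\t') for line in text.split('\n')]
--     num_cols = len(texts[0])
--     res:dict[int, list[str]] = {i:list() for i in cols if 0 <= i < num_cols}
--     for line in texts:
--         if len(line) < num_cols:
--             continue
--         for col in res.keys():
--             res[col].append(line[col]+'\n')
--     return res
-- ===== SOURCE B (Python) =====
-- def extract_cols(text, cols):
--     rows = [line.split('\t') for line in text.split('\n')]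
--     width = len(rows[0])
--     # transpose the table of sufficiently wide rows once; zip(*...) truncates
--     # each column to the shortest row, which is at least `width` long
--     columns = list(zip(*(r for r in rows if len(r) >= width)))
--     res = {}
--     for i in cols:
--         if 0 <= i < width and i not in res:
--             res[i] = [cell + '\n' for cell in columns[i]]
--     return res
-- ===== Notes on version B (the rewrite author's own statement) =====
-- stated objective: alternative
-- what changed: Instead of A's row-major fill (keys first, then append one cell per line to every key's list), B materialises the transposed table once with zip(*valid_rows) and then selects each requested column from that column-major structure by index.
import Mathlib
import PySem

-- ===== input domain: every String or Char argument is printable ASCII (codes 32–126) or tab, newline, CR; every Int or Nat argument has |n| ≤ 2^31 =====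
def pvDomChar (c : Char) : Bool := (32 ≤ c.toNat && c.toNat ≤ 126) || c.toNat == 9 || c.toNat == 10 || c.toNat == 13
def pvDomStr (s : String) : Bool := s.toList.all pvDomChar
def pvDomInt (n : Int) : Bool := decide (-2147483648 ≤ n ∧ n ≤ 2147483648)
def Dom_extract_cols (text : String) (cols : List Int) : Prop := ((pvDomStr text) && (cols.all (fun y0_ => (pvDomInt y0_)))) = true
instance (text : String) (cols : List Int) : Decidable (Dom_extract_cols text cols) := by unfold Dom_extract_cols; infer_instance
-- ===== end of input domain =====

-- B replaces A's row-major fill (keys first, then append one cell per line to every key's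
-- list) by building the transposed table once with zip(*valid_rows) and selecting each
-- requested column from it by index; same return value, similar cost (objective: alternative).

-- ===== PORT A =====
def extract_cols (text : String) (cols : List Int) : List (Int × List String) :=
  -- texts = [line.split('\t') for line in text.split('\n')]; the separators are the nonempty
  -- literals "\n"/"\t", so split? is always `some` and `.getD []` is exact
  let texts := ((PySem.Str.split? text "\n").getD []).map
      (fun line => (PySem.Str.split? line "\t").getD [])
  -- num_cols = len(texts[0]); split always yields at least one piece, so texts[0] never raises
  let numCols : Int := ((PySem.List.pyGetD texts 0 []).length : Int)
  -- res = {i: list() for i in cols if 0 <= i < num_cols}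
  let res0 : PySem.Dict Int (List String) :=
    cols.foldl (fun d i => if 0 ≤ i ∧ i < numCols then d.insert i [] else d) PySem.Dict.empty
  -- for line in texts: if len(line) < num_cols: continue
  --                    for col in res.keys(): res[col].append(line[col] + '\n')
  -- every key satisfies 0 ≤ col < num_cols ≤ len(line), so line[col] never raises and
  -- pyGetD / modify-with-default are exact
  let res := texts.foldl (fun d line =>
      if (line.length : Int) < numCols then d
      else d.keys.foldl
        (fun d' col => d'.modify col [] (fun v => v ++ [PySem.List.pyGetD line col "" ++ "\n"])) d) res0
  res.items

-- ===== PORT B =====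
-- zip(*rows): as many tuples as the shortest row; the k-th tuple holds each row's k-th cell.
-- Exact: k ranges below every row's length, so `getD k ""` is exactly the k-th cell.
def pvZipAll (rows : List (List String)) : List (List String) :=
  (List.range ((rows.map List.length).min?.getD 0)).map
    (fun k => rows.map (fun r => r.getD k ""))

def extract_cols_alt (text : String) (cols : List Int) : List (Int × List String) :=
  -- rows = [line.split('\t') for line in text.split('\n')]
  let rows := ((PySem.Str.split? text "\n").getD []).map
      (fun line => (PySem.Str.split? line "\t").getD [])
  -- width = len(rows[0])
  let width : Int := ((PySem.List.pyGetD rows 0 []).length : Int)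
  -- columns = list(zip(*(r for r in rows if len(r) >= width)))
  let columns := pvZipAll (rows.filter (fun r => decide (width ≤ (r.length : Int))))
  -- for i in cols: if 0 <= i < width and i not in res: res[i] = [cell + '\n' for cell in columns[i]]
  -- every selected i satisfies i < width ≤ len of every zipped column's source, so columns[i] never raises
  let res : PySem.Dict Int (List String) :=
    cols.foldl (fun d i =>
      if 0 ≤ i ∧ i < width ∧ d.contains i = false then
        d.insert i ((PySem.List.pyGetD columns i []).map (fun cell => cell ++ "\n"))
      else d) PySem.Dict.empty
  res.items

-- ===== PRECONDITION & SPEC =====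
def Spec_extract_cols (text : String) (cols : List Int) (out : List (Int × List String)) : Prop := out = extract_cols_alt text cols
instance (text : String) (cols : List Int) (out : List (Int × List String)) : Decidable (Spec_extract_cols text cols out) := by unfold Spec_extract_cols; infer_instance

-- ===== CLAIM (what is proved, stated in full; the proofs are below) =====
def Claim_equal_extract_cols : Prop := ∀ (text : String) (cols : List Int), Dom_extract_cols text cols → Spec_extract_cols text cols (extract_cols text cols)

-- ===== LEMMAS AND PROOFS =====

-- keys accumulated by either dict-building loop: append i when 0 ≤ i < n and i is fresh
def pvAddKeys (n : Int) (K : List Int) (cols : List Int) : List Int :=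
  cols.foldl (fun K i => if (0 ≤ i ∧ i < n) ∧ i ∉ K then K ++ [i] else K) K

theorem pvAddKeys_nodup (n : Int) (cols : List Int) :
    ∀ K : List Int, K.Nodup → (pvAddKeys n K cols).Nodup := by
  induction cols with
  | nil => intro K h; exact h
  | cons i cols ih =>
      intro K h
      unfold pvAddKeys
      simp only [List.foldl_cons]
      split_ifs with hc
      · refine ih _ ?_
        rw [List.nodup_append]
        refine ⟨h, List.nodup_singleton _, ?_⟩
        intro a ha b hb
        simp only [List.mem_singleton] at hb
        subst hb
        exact fun e => hc.2 (e ▸ ha)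
      · exact ih _ h

theorem pvAddKeys_mem (n : Int) (cols : List Int) :
    ∀ (K : List Int) (k : Int), k ∈ pvAddKeys n K cols → k ∈ K ∨ (0 ≤ k ∧ k < n) := by
  induction cols with
  | nil => intro K k h; exact Or.inl h
  | cons i cols ih =>
      intro K k h
      unfold pvAddKeys at h
      simp only [List.foldl_cons] at h
      split_ifs at h with hc
      · rcases ih _ _ h with hm | hb
        · rcases List.mem_append.mp hm with hm | hm
          · exact Or.inl hm
          · simp only [List.mem_singleton] at hm
            exact Or.inr (hm ▸ hc.1)
        · exact Or.inr hb
      · exact ih _ _ h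

theorem pv_contains_map {ν : Type} (K : List Int) (W : Int → ν) (i : Int) :
    (PySem.Dict.mk (K.map (fun k => (k, W k)))).contains i = decide (i ∈ K) := by
  simp only [PySem.Dict.contains, List.any_map, Function.comp_def]
  rw [Bool.eq_iff_iff]
  simp only [List.any_eq_true, beq_iff_eq, decide_eq_true_eq]
  exact ⟨fun ⟨x, hx, e⟩ => e ▸ hx, fun h => ⟨i, h, rfl⟩⟩

theorem pv_getD_map {ν : Type} (K : List Int) (W : Int → ν) (c : Int) (d0 : ν)
    (hc : c ∈ K) :
    (PySem.Dict.mk (K.map (fun k => (k, W k)))).getD c d0 = W c := by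
  induction K with
  | nil => cases hc
  | cons k K ih =>
      rw [PySem.Dict.getD_eq_get?_getD] at *
      simp only [List.map_cons]
      rw [PySem.Dict.get?_mk_cons]
      by_cases hk : k = c
      · simp [hk]
      · have : c ∈ K := by cases hc with
          | head => exact absurd rfl hk
          | tail _ h => exact h
        simpa [hk] using ih this

-- one modify at a key c ∈ K keeps the dict in "map over K" shape
theorem pv_modify_map (K : List Int) (W : Int → List String) (c : Int)
    (y : Int → String) (hc : c ∈ K) :
    (PySem.Dict.mk (K.map (fun k => (k, W k)))).modify c [] (fun v => v ++ [y c])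
      = PySem.Dict.mk (K.map (fun k => (k, if k = c then W k ++ [y k] else W k))) := by
  have hcon : (PySem.Dict.mk (K.map (fun k => (k, W k)))).contains c = true := by
    rw [pv_contains_map]; simpa using hc
  have hget : (PySem.Dict.mk (K.map (fun k => (k, W k)))).getD c [] = W c :=
    pv_getD_map K W c [] hc
  unfold PySem.Dict.modify
  rw [hget]
  apply PySem.Dict.ext
  rw [PySem.Dict.items_insert_of_contains _ _ hcon]
  simp only [List.map_map]
  apply List.map_congr_left
  intro k _
  by_cases hk : k = c <;> simp [hk, Function.comp]

-- the inner `for col in res.keys()` loop, over a duplicate-free list of keys all present in K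
theorem pv_inner (K : List Int) (y : Int → String) :
    ∀ (ks : List Int) (W : Int → List String), ks.Nodup → (∀ c ∈ ks, c ∈ K) →
    (ks.foldl (fun d' col => d'.modify col [] (fun v => v ++ [y col]))
        (PySem.Dict.mk (K.map (fun k => (k, W k)))))
      = PySem.Dict.mk (K.map (fun k => (k, W k ++ (if k ∈ ks then [y k] else [])))) := by
  intro ks
  induction ks with
  | nil => intro W _ _; simp
  | cons c ks ih =>
      intro W hnd hsub
      simp only [List.foldl_cons]
      rw [pv_modify_map K W c y (hsub c (by simp))]
      rw [ih _ (List.Nodup.of_cons hnd) (fun x hx => hsub x (by simp [hx]))]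
      congr 1
      apply List.map_congr_left
      intro k _
      have hcns : c ∉ ks := (List.nodup_cons.mp hnd).1
      by_cases hk : k = c
      · subst hk; simp [hcns]
      · simp [hk]

-- the `for line in texts` fill loop
theorem pv_fill (n : Int) (K : List Int) (hK : K.Nodup) :
    ∀ (lines : List (List String)) (W : Int → List String),
    (lines.foldl (fun d line =>
        if (line.length : Int) < n then d
        else d.keys.foldl
          (fun d' col => d'.modify col [] (fun v => v ++ [PySem.List.pyGetD line col "" ++ "\n"])) d)
      (PySem.Dict.mk (K.map (fun k => (k, W k))))).items
    = K.map (fun k => (k, W k ++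
        (lines.filter (fun l => decide (n ≤ (l.length : Int)))).map
          (fun l => PySem.List.pyGetD l k "" ++ "\n"))) := by
  intro lines
  induction lines with
  | nil => intro W; simp
  | cons line lines ih =>
      intro W
      simp only [List.foldl_cons, List.filter_cons]
      by_cases hlen : (line.length : Int) < n
      · have : (decide (n ≤ (line.length : Int))) = false := by simp; omega
        rw [if_pos hlen, this, ih]
        simp
      · have hk : (decide (n ≤ (line.length : Int))) = true := by simp; omega
        rw [if_neg hlen, hk]
        have hkeys : (PySem.Dict.mk (K.map (fun k => (k, W k)))).keys = K := by
          simp [PySem.Dict.keys, Function.comp_def]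
        rw [hkeys,
          pv_inner K (fun col => PySem.List.pyGetD line col "" ++ "\n") K W hK (fun _ h => h),
          ih]
        apply List.map_congr_left
        intro k hkK
        simp [hkK, List.append_assoc]

-- A's key-building loop
theorem pv_buildA (n : Int) :
    ∀ (cols : List Int) (K : List Int),
    (cols.foldl (fun d i => if 0 ≤ i ∧ i < n then d.insert i [] else d)
        (PySem.Dict.mk (K.map (fun k => (k, ([] : List String))))))
      = PySem.Dict.mk ((pvAddKeys n K cols).map (fun k => (k, ([] : List String)))) := by
  intro cols
  induction cols with
  | nil => intro K; simp [pvAddKeys]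
  | cons i cols ih =>
      intro K
      simp only [List.foldl_cons]
      unfold pvAddKeys
      simp only [List.foldl_cons]
      by_cases hp : 0 ≤ i ∧ i < n
      · rw [if_pos hp]
        by_cases hm : i ∈ K
        · rw [if_neg (by simp [hm])]
          have hcon : (PySem.Dict.mk (K.map (fun k => (k, ([] : List String))))).contains i = true := by
            rw [pv_contains_map]; simpa using hm
          have heq : (PySem.Dict.mk (K.map (fun k => (k, ([] : List String))))).insert i []
              = PySem.Dict.mk (K.map (fun k => (k, ([] : List String)))) := by
            apply PySem.Dict.ext
            rw [PySem.Dict.items_insert_of_contains _ _ hcon]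
            simp only [List.map_map]
            apply List.map_congr_left
            intro k _
            by_cases hk : k = i <;> simp [hk, Function.comp]
          rw [heq]
          exact ih K
        · rw [if_pos (by exact ⟨hp, hm⟩)]
          have hcon : (PySem.Dict.mk (K.map (fun k => (k, ([] : List String))))).contains i = false := by
            rw [pv_contains_map]; simpa using hm
          have heq : (PySem.Dict.mk (K.map (fun k => (k, ([] : List String))))).insert i []
              = PySem.Dict.mk ((K ++ [i]).map (fun k => (k, ([] : List String)))) := by
            apply PySem.Dict.ext
            rw [PySem.Dict.items_insert_of_not_contains _ _ hcon]
            simp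
          rw [heq]
          exact ih (K ++ [i])
      · rw [if_neg hp, if_neg (fun h => hp h.1)]
        exact ih K

-- B's single dict-building loop
theorem pv_buildB (n : Int) (V : Int → List String) :
    ∀ (cols : List Int) (K : List Int),
    (cols.foldl (fun d i =>
        if 0 ≤ i ∧ i < n ∧ d.contains i = false then d.insert i (V i) else d)
        (PySem.Dict.mk (K.map (fun k => (k, V k)))))
      = PySem.Dict.mk ((pvAddKeys n K cols).map (fun k => (k, V k))) := by
  intro cols
  induction cols with
  | nil => intro K; simp [pvAddKeys]
  | cons i cols ih =>
      intro K
      simp only [List.foldl_cons]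
      unfold pvAddKeys
      simp only [List.foldl_cons]
      by_cases hc : (0 ≤ i ∧ i < n) ∧ i ∉ K
      · rw [if_pos hc]
        have hcon : (PySem.Dict.mk (K.map (fun k => (k, V k)))).contains i = false := by
          rw [pv_contains_map]; simpa using hc.2
        rw [if_pos ⟨hc.1.1, hc.1.2, hcon⟩]
        have heq : (PySem.Dict.mk (K.map (fun k => (k, V k)))).insert i (V i)
            = PySem.Dict.mk ((K ++ [i]).map (fun k => (k, V k))) := by
          apply PySem.Dict.ext
          rw [PySem.Dict.items_insert_of_not_contains _ _ hcon]
          simp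
        rw [heq]
        exact ih (K ++ [i])
      · rw [if_neg hc]
        have : ¬ (0 ≤ i ∧ i < n ∧ (PySem.Dict.mk (K.map (fun k => (k, V k)))).contains i = false) := by
          rw [pv_contains_map]
          intro ⟨h1, h2, h3⟩
          exact hc ⟨⟨h1, h2⟩, by simpa using h3⟩
        rw [if_neg this]
        exact ih K

-- A reduced to "filter then per-key comprehension" form (row-major fill fused away)
theorem pv_mainA (n : Int) (lines : List (List String)) (cols : List Int) :
    (lines.foldl (fun d line =>
        if (line.length : Int) < n then d
        else d.keys.foldl
          (fun d' col => d'.modify col [] (fun v => v ++ [PySem.List.pyGetD line col "" ++ "\n"])) d)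
      (cols.foldl (fun d i => if 0 ≤ i ∧ i < n then d.insert i [] else d) PySem.Dict.empty)).items
    = (pvAddKeys n [] cols).map (fun k =>
        (k, (lines.filter (fun line => decide (n ≤ (line.length : Int)))).map
          (fun line => PySem.List.pyGetD line k "" ++ "\n"))) := by
  have hempty : (PySem.Dict.empty : PySem.Dict Int (List String))
      = PySem.Dict.mk ((([] : List Int)).map (fun k => (k, ([] : List String)))) := rfl
  conv_lhs => rw [hempty]
  rw [pv_buildA n cols []]
  rw [pv_fill n (pvAddKeys n [] cols) (pvAddKeys_nodup n cols [] List.nodup_nil) lines (fun _ => [])]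
  simp

-- a selected column of the zipped table IS that column read row by row
theorem pv_col (valid : List (List String)) (n : Nat) (i : Int)
    (hne : valid ≠ []) (hlen : ∀ r ∈ valid, n ≤ r.length)
    (h0 : 0 ≤ i) (hin : i < (n : Int)) :
    PySem.List.pyGetD (pvZipAll valid) i []
      = valid.map (fun r => PySem.List.pyGetD r i "") := by
  obtain ⟨m, hm⟩ : ∃ m, (valid.map List.length).min? = some m := by
    cases h : (valid.map List.length).min? with
    | some m => exact ⟨m, rfl⟩
    | none => exact absurd (by simpa using List.min?_eq_none_iff.mp h) hne
  have hmmem : m ∈ valid.map List.length := List.min?_mem hm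
  obtain ⟨r0, hr0, hr0len⟩ := List.mem_map.mp hmmem
  have hnm : n ≤ m := hr0len ▸ hlen r0 hr0
  unfold pvZipAll
  rw [hm]
  simp only [Option.getD_some]
  rw [PySem.List.pyGetD_eq_getElem _ _ h0 (by simp; omega)]
  rw [List.getElem_map, List.getElem_range]
  apply List.map_congr_left
  intro r hr
  rw [PySem.List.pyGetD_eq_getElem _ _ h0 (by have := hlen r hr; simp; omega)]
  rw [List.getD_eq_getElem _ _ (by have := hlen r hr; omega)]

-- A's whole body equals B's whole body, over any row table
theorem pv_combined (rows : List (List String)) (cols : List Int) (n : Nat)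
    (hn : (PySem.List.pyGetD rows 0 []).length = n) :
    (rows.foldl (fun d line =>
        if (line.length : Int) < (n : Int) then d
        else d.keys.foldl
          (fun d' col => d'.modify col [] (fun v => v ++ [PySem.List.pyGetD line col "" ++ "\n"])) d)
      (cols.foldl (fun d i => if 0 ≤ i ∧ i < (n : Int) then d.insert i [] else d)
        PySem.Dict.empty)).items
    = (cols.foldl (fun d i =>
        if 0 ≤ i ∧ i < (n : Int) ∧ d.contains i = false then
          d.insert i ((PySem.List.pyGetD (pvZipAll (rows.filter
            (fun r => decide ((n : Int) ≤ (r.length : Int))))) i []).map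
            (fun cell => cell ++ "\n"))
        else d) PySem.Dict.empty).items := by
  rw [pv_mainA (n : Int) rows cols]
  have hempty : (PySem.Dict.empty : PySem.Dict Int (List String))
      = PySem.Dict.mk ((([] : List Int)).map (fun k =>
          (k, (PySem.List.pyGetD (pvZipAll (rows.filter
            (fun r => decide ((n : Int) ≤ (r.length : Int))))) k []).map
            (fun cell => cell ++ "\n")))) := rfl
  conv_rhs => rw [hempty]
  rw [pv_buildB (n : Int) (fun k =>
      (PySem.List.pyGetD (pvZipAll (rows.filter
        (fun r => decide ((n : Int) ≤ (r.length : Int))))) k []).map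
        (fun cell => cell ++ "\n")) cols []]
  apply List.map_congr_left
  intro k hk
  have hkb : 0 ≤ k ∧ k < (n : Int) := by
    rcases pvAddKeys_mem (n : Int) cols [] k hk with h | h
    · cases h
    · exact h
  have hnpos : 0 < n := by omega
  have hrne : rows ≠ [] := by
    intro h
    rw [h, PySem.List.pyGetD_zero] at hn
    simp at hn
    omega
  obtain ⟨r0, rest, hcons⟩ : ∃ r0 rest, rows = r0 :: rest := by
    cases rows with
    | nil => exact absurd rfl hrne
    | cons a l => exact ⟨a, l, rfl⟩
  have hr0len : r0.length = n := by rw [← hn, hcons, PySem.List.pyGetD_zero_cons]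
  have hr0valid : r0 ∈ rows.filter (fun r => decide ((n : Int) ≤ (r.length : Int))) := by
    rw [hcons]
    simp [hr0len]
  have hvalidlen : ∀ r ∈ rows.filter (fun r => decide ((n : Int) ≤ (r.length : Int))),
      n ≤ r.length := by
    intro r hr
    have := (List.mem_filter.mp hr).2
    simp at this
    omega
  rw [pv_col _ n k (List.ne_nil_of_mem hr0valid) hvalidlen hkb.1 hkb.2]
  rw [List.map_map]
  rfl

theorem extract_cols_spec : Claim_equal_extract_cols := by
  intro text cols _
  unfold Spec_extract_cols
  simp only [extract_cols, extract_cols_alt]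
  exact pv_combined _ cols _ rfl
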